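-- pv_equiv track=rewrite | github.com/PolyBotDevTeam/PolyBot | elo.py | _find_best_status_achieved
-- ===== SOURCE A (Python) =====
-- def _find_best_status_achieved(score, statuses_levels):
--     statuses_levels = list(statuses_levels.items())
--     statuses_levels.sort(key=lambda kv: kv[1])
--     status = None
--     for potential_status, score_need in statuses_levels:
--         if score >= score_need:
--             status = potential_status
--     return status
-- ===== SOURCE B (Python) =====
-- def _find_best_status_achieved(score, statuses_levels):
--     # Single linear scan: keep the qualifying entry with the highest required
--     # score, later entries winning ties (matching the stable sort + overwrite
--     # loop of the original).
--     best = None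
--     for status, need in statuses_levels.items():
--         if score >= need and (best is None or best[1] <= need):
--             best = (status, need)
--     return None if best is None else best[0]
-- ===== Notes on version B (the rewrite author's own statement) =====
-- stated objective: faster
-- what changed: Replaces sort-then-overwrite-scan with a single linear pass tracking the qualifying entry of maximal required score (ties to the later entry), so no sorted copy is built.
import Mathlib
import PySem

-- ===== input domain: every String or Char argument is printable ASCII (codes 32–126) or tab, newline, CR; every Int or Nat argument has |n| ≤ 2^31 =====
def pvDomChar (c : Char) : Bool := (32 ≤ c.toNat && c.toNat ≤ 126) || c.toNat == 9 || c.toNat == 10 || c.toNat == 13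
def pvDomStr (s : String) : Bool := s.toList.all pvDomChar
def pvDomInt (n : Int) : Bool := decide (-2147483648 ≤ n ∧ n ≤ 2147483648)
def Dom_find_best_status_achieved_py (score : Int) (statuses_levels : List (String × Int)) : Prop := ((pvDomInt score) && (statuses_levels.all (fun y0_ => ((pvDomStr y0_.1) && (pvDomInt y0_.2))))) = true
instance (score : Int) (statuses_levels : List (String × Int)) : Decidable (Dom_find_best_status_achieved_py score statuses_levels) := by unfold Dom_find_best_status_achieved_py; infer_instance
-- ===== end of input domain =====

-- B replaces A's sort-then-overwrite loop by a single linear scan keeping the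
-- qualifying entry of maximal required score (later entries win ties): faster, same result.


-- ===== PORT A =====
-- list(statuses_levels.items()) is the association list itself; then a stable
-- sort by the value, then the overwrite loop keeping the last qualifying key.
def find_best_status_achieved_py (score : Int) (statuses_levels : List (String × Int)) : Option String :=
  let items := PySem.List.sorted statuses_levels (fun kv => kv.2)
  items.foldl (fun status kv => if score ≥ kv.2 then some kv.1 else status) none

-- ===== PORT B =====
def find_best_status_achieved_py_alt (score : Int) (statuses_levels : List (String × Int)) : Option String :=
  (statuses_levels.foldl
    (fun best kv =>
      match best with
      | none => if score ≥ kv.2 then some kv else none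
      | some b => if score ≥ kv.2 ∧ b.2 ≤ kv.2 then some kv else some b)
    none).map Prod.fst

-- ===== PRECONDITION & SPEC =====
def Spec_find_best_status_achieved_py (score : Int) (statuses_levels : List (String × Int)) (out : Option String) : Prop := out = find_best_status_achieved_py_alt score statuses_levels
instance (score : Int) (statuses_levels : List (String × Int)) (out : Option String) : Decidable (Spec_find_best_status_achieved_py score statuses_levels out) := by unfold Spec_find_best_status_achieved_py; infer_instance

-- ===== CLAIM (what is proved, stated in full; the proofs are below) =====
def Claim_equal_find_best_status_achieved_py : Prop := ∀ (score : Int) (statuses_levels : List (String × Int)), Dom_find_best_status_achieved_py score statuses_levels → Spec_find_best_status_achieved_py score statuses_levels (find_best_status_achieved_py score statuses_levels)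

-- ===== LEMMAS AND PROOFS =====

-- Proof-side names for the two loop bodies (pair-valued version of A's loop).
def pvStepA (score : Int) (st : Option (String × Int)) (kv : String × Int) : Option (String × Int) :=
  if score ≥ kv.2 then some kv else st

def pvStepB (score : Int) (best : Option (String × Int)) (kv : String × Int) : Option (String × Int) :=
  match best with
  | none => if score ≥ kv.2 then some kv else none
  | some b => if score ≥ kv.2 ∧ b.2 ≤ kv.2 then some kv else some b

def pvP (score : Int) (kv : String × Int) : Bool := decide (score ≥ kv.2)

-- A's key-valued loop is the pair-valued loop followed by `.map Prod.fst`.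
theorem pvA_map (score : Int) : ∀ (ys : List (String × Int)) (st : Option (String × Int)),
    ys.foldl (fun status kv => if score ≥ kv.2 then some kv.1 else status) (st.map Prod.fst)
      = (ys.foldl (pvStepA score) st).map Prod.fst := by
  intro ys
  induction ys with
  | nil => intro st; rfl
  | cons y ys ih =>
      intro st
      simp only [List.foldl_cons, pvStepA]
      by_cases h : score ≥ y.2
      · simpa [h] using ih (some y)
      · simpa [h] using ih st

-- (x :: l).getLast? via Option.or (specialisation of List.getLast?_append to a singleton).
theorem pvGetLast_cons {α : Type} (x : α) (l : List α) :
    (x :: l).getLast? = l.getLast?.or (some x) := by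
  have h := List.getLast?_append (l := [x]) (l' := l)
  simpa using h

-- A's pair-valued loop returns the last qualifying element.
theorem pvA_getLast (score : Int) : ∀ (ys : List (String × Int)) (st : Option (String × Int)),
    ys.foldl (pvStepA score) st = ((ys.filter (pvP score)).getLast?).or st := by
  intro ys
  induction ys with
  | nil => intro st; rfl
  | cons y ys ih =>
      intro st
      simp only [List.foldl_cons, List.filter_cons]
      by_cases h : score ≥ y.2
      · have hp : pvP score y = true := by simp [pvP, h]
        rw [hp, ih (pvStepA score st y)]
        simp [pvStepA, h, pvGetLast_cons]
      · have hp : pvP score y = false := by simp [pvP, h]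
        rw [hp, ih (pvStepA score st y)]
        simp [pvStepA, h]

-- insertBy splits the list at the first element the new one must go before.
theorem pvInsertBy_eq {α : Type} (bf : α → α → Bool) (x : α) : ∀ (ys : List α),
    PySem.List.insertBy bf x ys
      = ys.takeWhile (fun y => !bf x y) ++ x :: ys.dropWhile (fun y => !bf x y) := by
  intro ys
  induction ys with
  | nil => rfl
  | cons y ys ih =>
      by_cases h : bf x y
      · simp [PySem.List.insertBy, h]
      · simp only [Bool.not_eq_true] at h
        simp [PySem.List.insertBy, h, ih]

-- In a value-sorted list, everything dropped by `≤ x.2` is strictly above x.2.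
theorem pvDrop_gt (x : String × Int) : ∀ (S : List (String × Int)),
    S.Pairwise (fun a b => a.2 ≤ b.2) →
    ∀ z ∈ S.dropWhile (fun y => !decide (x.2 < y.2)), x.2 < z.2 := by
  intro S
  induction S with
  | nil => intro _ z hz; simp at hz
  | cons s S ih =>
      intro hpair z hz
      rcases List.pairwise_cons.mp hpair with ⟨hs, htail⟩
      by_cases h : x.2 < s.2
      · rw [List.dropWhile_cons_of_neg (by simp [h])] at hz
        rcases List.mem_cons.mp hz with rfl | hz'
        · exact h
        · exact lt_of_lt_of_le h (hs z hz')
      · rw [List.dropWhile_cons_of_pos (by simp [h])] at hz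
        exact ih htail z hz

-- Main invariant: last qualifying element of the value-sorted list
-- = the linear scan's best (max value among qualifying, later ties win).
theorem pvMain (score : Int) : ∀ (xs : List (String × Int)),
    ((PySem.List.sorted xs (fun kv => kv.2)).filter (pvP score)).getLast?
      = xs.foldl (pvStepB score) none := by
  intro xs
  induction xs using List.reverseRecOn with
  | nil => rfl
  | append_singleton xs x ih =>
      have hsort : PySem.List.sorted (xs ++ [x]) (fun kv => kv.2)
          = PySem.List.insertBy (fun a b => decide (a.2 < b.2)) x
              (PySem.List.sorted xs (fun kv => kv.2)) := by
        rw [PySem.List.sorted_eq_foldl_insertBy, PySem.List.sorted_eq_foldl_insertBy,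
          List.foldl_append, List.foldl_cons, List.foldl_nil]
      set S := PySem.List.sorted xs (fun kv => kv.2) with hS
      have hpair : S.Pairwise (fun a b => a.2 ≤ b.2) :=
        PySem.List.sorted_pairwise xs (fun kv => kv.2)
      set q : String × Int → Bool := fun y => !decide (x.2 < y.2) with hq
      have hdecomp : PySem.List.insertBy (fun a b => decide (a.2 < b.2)) x S
          = S.takeWhile q ++ x :: S.dropWhile q :=
        pvInsertBy_eq _ x S
      have hSsplit : S = S.takeWhile q ++ S.dropWhile q := (List.takeWhile_append_dropWhile).symm
      rw [List.foldl_append, List.foldl_cons, List.foldl_nil, ← ih, hsort, hdecomp]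
      rw [List.filter_append, List.getLast?_append, List.filter_cons]
      conv_rhs => rw [hSsplit, List.filter_append, List.getLast?_append]
      by_cases hx : score ≥ x.2
      · have hpx : pvP score x = true := by simp [pvP, hx]
        rw [hpx]
        simp only [reduceIte, pvGetLast_cons, Option.or_assoc, Option.some_or]
        cases hD : ((S.dropWhile q).filter (pvP score)).getLast? with
        | none =>
            simp only [Option.none_or]
            cases hT : ((S.takeWhile q).filter (pvP score)).getLast? with
            | none => simp [pvStepB, hx]
            | some b =>
                have hbT : b ∈ S.takeWhile q :=
                  List.mem_of_mem_filter (List.mem_of_getLast? hT)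
                have hble : b.2 ≤ x.2 := by
                  have := List.mem_takeWhile_imp hbT
                  simp only [hq, Bool.not_eq_true', decide_eq_false_iff_not, not_lt] at this
                  exact this
                simp [pvStepB, hx, hble]
        | some qel =>
            have hqmem : qel ∈ S.dropWhile q :=
              List.mem_of_mem_filter (List.mem_of_getLast? hD)
            have hqgt : x.2 < qel.2 := pvDrop_gt x S hpair qel hqmem
            simp [pvStepB, hx, not_le.mpr hqgt]
      · have hpx : pvP score x = false := by simp [pvP, hx]
        rw [hpx]
        simp only [Bool.false_eq_true, if_false]
        cases hB : (((S.dropWhile q).filter (pvP score)).getLast?).or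
            (((S.takeWhile q).filter (pvP score)).getLast?) with
        | none => simp [pvStepB, hx]
        | some b => simp [pvStepB, hx]

-- ===== VERDICT (by name: the statement is the Claim_ definition above) =====
theorem find_best_status_achieved_py_spec : Claim_equal_find_best_status_achieved_py := by
  intro score sl _
  show find_best_status_achieved_py score sl = find_best_status_achieved_py_alt score sl
  have hA : find_best_status_achieved_py score sl
      = ((PySem.List.sorted sl (fun kv => kv.2)).foldl (pvStepA score) none).map Prod.fst := by
    have := pvA_map score (PySem.List.sorted sl (fun kv => kv.2)) none
    simpa [find_best_status_achieved_py] using this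
  have hB : find_best_status_achieved_py_alt score sl
      = (sl.foldl (pvStepB score) none).map Prod.fst := rfl
  rw [hA, hB, pvA_getLast score _ none, Option.or_none, pvMain score]
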